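-- pv_equiv track=rewrite | github.com/Xandetds/estudos-dev | python/exercicio27.py | verificar_letra_oculta
-- ===== SOURCE A (Python) =====
-- def verificar_letra_oculta(palavra_secreta, letras_adivinhadas):
--     palavra = ''
--     letras_adivinhadas = letras_adivinhadas.lower()
--
--     for letra in palavra_secreta:
--         if not letra.isalpha():
--             palavra += letra
--         elif letra.lower() in letras_adivinhadas:
--             palavra += letra
--         else:
--             palavra += '_'
--
--     return palavra
-- ===== SOURCE B (Python) =====
-- def verificar_letra_oculta(palavra_secreta, letras_adivinhadas):
--     # Start from a fully masked word, then reveal occurrences guess by guess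
--     # (distinct guesses only; repeated guesses would be redundant passes).
--     masked = ['_' if c.isalpha() else c for c in palavra_secreta]
--     for g in dict.fromkeys(letras_adivinhadas.lower()):
--         masked = [c if c.lower() == g else m
--                   for c, m in zip(palavra_secreta, masked)]
--     return ''.join(masked)
-- ===== Notes on version B (the rewrite author's own statement) =====
-- stated objective: alternative
-- what changed: B inverts the traversal: instead of A's single pass over the word testing each character against the guess string, B first builds a fully masked word (every alphabetic character blanked) and then makes one reveal pass per distinct guessed letter, un-masking that letter's occurrences.
import Mathlib
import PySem

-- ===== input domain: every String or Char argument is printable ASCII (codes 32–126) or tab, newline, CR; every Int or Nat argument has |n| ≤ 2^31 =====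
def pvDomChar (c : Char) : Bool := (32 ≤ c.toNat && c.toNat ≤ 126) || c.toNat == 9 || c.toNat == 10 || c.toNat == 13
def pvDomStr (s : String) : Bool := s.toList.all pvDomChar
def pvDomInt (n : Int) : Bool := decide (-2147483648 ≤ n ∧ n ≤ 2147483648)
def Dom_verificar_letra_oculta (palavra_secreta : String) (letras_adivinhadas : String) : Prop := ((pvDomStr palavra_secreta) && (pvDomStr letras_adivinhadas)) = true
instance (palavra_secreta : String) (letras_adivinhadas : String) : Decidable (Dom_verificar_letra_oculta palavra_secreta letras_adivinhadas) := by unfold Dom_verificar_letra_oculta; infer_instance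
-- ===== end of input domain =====

-- B inverts the traversal (start fully masked, reveal guess by guess); same return value as A.

-- ===== PORT A =====
-- literal port: accumulate the output character list left to right with A's branch order
def verificar_letra_oculta (palavra_secreta : String) (letras_adivinhadas : String) : String :=
  let la := PySem.Chars.lower letras_adivinhadas.toList
  String.mk (palavra_secreta.toList.foldl (fun palavra letra =>
    if !(PySem.Chars.isalpha letra) then palavra ++ [letra]
    else if PySem.Chars.isIn [PySem.Chars.lowerChar letra] la then palavra ++ [letra]
    else palavra ++ ['_']) [])

-- ===== PORT B =====
-- start from a fully masked word, then one reveal pass per distinct guessed letter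
-- (dict.fromkeys = PySem.Set.ofList; zip = Python's 'zip(palavra_secreta, masked)' comprehension)
def verificar_letra_oculta_alt (palavra_secreta : String) (letras_adivinhadas : String) : String :=
  let p := palavra_secreta.toList
  let masked0 := p.map (fun c => if PySem.Chars.isalpha c then '_' else c)
  String.mk ((PySem.Set.ofList (PySem.Chars.lower letras_adivinhadas.toList)).foldl
    (fun masked g => List.zipWith (fun c m => if PySem.Chars.lowerChar c == g then c else m) p masked)
    masked0)

-- ===== PRECONDITION & SPEC =====
def Spec_verificar_letra_oculta (palavra_secreta : String) (letras_adivinhadas : String) (out : String) : Prop := out = verificar_letra_oculta_alt palavra_secreta letras_adivinhadas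
instance (palavra_secreta : String) (letras_adivinhadas : String) (out : String) : Decidable (Spec_verificar_letra_oculta palavra_secreta letras_adivinhadas out) := by unfold Spec_verificar_letra_oculta; infer_instance

-- ===== CLAIM (what is proved, stated in full; the proofs are below) =====
def Claim_equal_verificar_letra_oculta : Prop := ∀ (palavra_secreta : String) (letras_adivinhadas : String), Dom_verificar_letra_oculta palavra_secreta letras_adivinhadas → Spec_verificar_letra_oculta palavra_secreta letras_adivinhadas (verificar_letra_oculta palavra_secreta letras_adivinhadas)

-- ===== LEMMAS AND PROOFS =====

-- A's accumulation is a map over the word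
theorem pvFoldA (la : List Char) (xs acc : List Char) :
    xs.foldl (fun palavra letra =>
      if !(PySem.Chars.isalpha letra) then palavra ++ [letra]
      else if PySem.Chars.isIn [PySem.Chars.lowerChar letra] la then palavra ++ [letra]
      else palavra ++ ['_']) acc
    = acc ++ xs.map (fun c =>
        if PySem.Chars.isalpha c && !(PySem.Chars.isIn [PySem.Chars.lowerChar c] la) then '_' else c) := by
  induction xs generalizing acc with
  | nil => simp
  | cons c xs ih =>
    simp only [List.foldl_cons, List.map_cons, ih]
    by_cases h1 : PySem.Chars.isalpha c <;>
      by_cases h2 : PySem.Chars.isIn [PySem.Chars.lowerChar c] la <;>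
      simp [h1, h2]

-- zipWith over the same left list composed with a map of that list is a map
theorem pvZipWithMap {α β : Type} (f : α → β → β) (h : α → β) (p : List α) :
    List.zipWith f p (p.map h) = p.map (fun c => f c (h c)) := by
  induction p with
  | nil => rfl
  | cons a p ih => simp [ih]

-- composing two zipWith passes with the same left list
theorem pvZipWithComp {α β : Type} (f g : α → β → β) (p : List α) (m : List β) :
    List.zipWith f p (List.zipWith g p m) = List.zipWith (fun c mc => f c (g c mc)) p m := by
  induction p generalizing m with
  | nil => rfl
  | cons a p ih => cases m <;> simp [ih]

-- a zipWith that keeps its right argument is the identity (equal lengths)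
theorem pvZipWithId {α β : Type} (p : List α) (m : List β) (hm : m.length = p.length) :
    List.zipWith (fun _ mc => mc) p m = m := by
  induction p generalizing m with
  | nil => cases m with
    | nil => rfl
    | cons b m => simp at hm
  | cons a p ih => cases m with
    | nil => simp at hm
    | cons b m => simp only [List.zipWith]; rw [ih m (by simpa using hm)]

-- B's reveal loop, characterised: a position is revealed iff its lowered letter occurs in gs
theorem pvFoldB (p : List Char) (gs : List Char) (m : List Char) (hm : m.length = p.length) :
    gs.foldl (fun masked g =>
        List.zipWith (fun c mc => if PySem.Chars.lowerChar c == g then c else mc) p masked) m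
    = List.zipWith (fun c mc => if PySem.Chars.lowerChar c ∈ gs then c else mc) p m := by
  induction gs generalizing m with
  | nil =>
    simp only [List.foldl_nil, List.not_mem_nil, if_false]
    exact (pvZipWithId p m hm).symm
  | cons g gs ih =>
    simp only [List.foldl_cons]
    rw [ih _ (by simp [hm]), pvZipWithComp]
    have hf : (fun (c : Char) (mc : Char) =>
        if PySem.Chars.lowerChar c ∈ gs then c
        else if PySem.Chars.lowerChar c == g then c else mc)
      = (fun (c : Char) (mc : Char) => if PySem.Chars.lowerChar c ∈ g :: gs then c else mc) := by
      funext c mc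
      by_cases h1 : PySem.Chars.lowerChar c ∈ gs <;>
        by_cases h2 : PySem.Chars.lowerChar c = g <;>
        simp [h1, h2]
    rw [hf]

-- ===== VERDICT (by name: the statement is the Claim_ definition above) =====
theorem verificar_letra_oculta_spec : Claim_equal_verificar_letra_oculta := by
  intro ps la _
  unfold Spec_verificar_letra_oculta verificar_letra_oculta verificar_letra_oculta_alt
  dsimp only
  rw [pvFoldA, pvFoldB _ _ _ (by simp), pvZipWithMap]
  simp only [PySem.Set.mem_ofList]
  simp only [List.nil_append]
  congr 1
  apply List.map_congr_left
  intro c _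
  have hmem : PySem.Chars.isIn [PySem.Chars.lowerChar c] (PySem.Chars.lower la.toList) = true ↔
      PySem.Chars.lowerChar c ∈ PySem.Chars.lower la.toList := by
    rw [PySem.Chars.isIn_iff_infix, List.singleton_infix_iff]
  by_cases h1 : PySem.Chars.lowerChar c ∈ PySem.Chars.lower la.toList
  · simp [h1, hmem.mpr h1]
  · have : PySem.Chars.isIn [PySem.Chars.lowerChar c] (PySem.Chars.lower la.toList) = false := by
      rw [Bool.eq_false_iff]; intro h; exact h1 (hmem.mp h)
    by_cases h2 : PySem.Chars.isalpha c <;> simp [h1, h2, this]
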